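-- pv_equiv track=rewrite | github.com/Yldrax/everybody-codes | 2025/quest_06.py | calc_pairs
-- ===== SOURCE A (Python) =====
-- def calc_pairs(notes: str) -> int:
--     total = 0
--     sword = 0
--     archery = 0
--     magic = 0
--     for n in notes:
--         match n:
--             case "A":
--                 sword += 1
--             case "B":
--                 archery += 1
--             case "C":
--                 magic += 1
--             case "a":
--                 total += sword
--             case "b":
--                 total += archery
--             case "c":
--                 total += magic
--     return total
-- ===== SOURCE B (Python) =====
-- def calc_pairs(notes: str) -> int:
--     def count_ordered(s, upper, lower):
--         seen = 0
--         sub = 0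
--         for ch in s:
--             if ch == upper:
--                 seen += 1
--             elif ch == lower:
--                 sub += seen
--         return sub
--     return (count_ordered(notes, "A", "a")
--             + count_ordered(notes, "B", "b")
--             + count_ordered(notes, "C", "c"))
-- ===== Notes on version B (the rewrite author's own statement) =====
-- stated objective: simpler
-- what changed: Replaces A's single interleaved pass maintaining four counters with a reusable helper count_ordered(notes, upper, lower) that scans once per letter type (counter of uppers, subtotal at each lower), summed over the three types.
import Mathlib
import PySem

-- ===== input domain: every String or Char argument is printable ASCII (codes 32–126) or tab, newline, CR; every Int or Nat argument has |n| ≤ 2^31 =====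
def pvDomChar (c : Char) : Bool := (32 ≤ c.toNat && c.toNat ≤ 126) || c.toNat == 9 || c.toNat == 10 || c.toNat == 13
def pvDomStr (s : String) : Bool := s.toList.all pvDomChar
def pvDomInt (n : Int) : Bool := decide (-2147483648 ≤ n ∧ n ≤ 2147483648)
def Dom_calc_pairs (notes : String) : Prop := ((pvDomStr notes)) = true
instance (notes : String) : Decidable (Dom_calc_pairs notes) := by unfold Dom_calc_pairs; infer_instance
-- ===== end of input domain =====

-- B replaces A's single interleaved pass (four counters) with a reusable per-letter-type
-- scan summed over the three types; same O(n) cost, simpler decomposition.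

-- ===== PORT A =====
-- A's loop over the string, carrying (total, sword, archery, magic); branches in A's match order.
def pvLoopA : List Char → Int → Int → Int → Int → Int
  | [], total, _, _, _ => total
  | n :: rest, total, sword, archery, magic =>
    if n = 'A' then pvLoopA rest total (sword + 1) archery magic
    else if n = 'B' then pvLoopA rest total sword (archery + 1) magic
    else if n = 'C' then pvLoopA rest total sword archery (magic + 1)
    else if n = 'a' then pvLoopA rest (total + sword) sword archery magic
    else if n = 'b' then pvLoopA rest (total + archery) sword archery magic
    else if n = 'c' then pvLoopA rest (total + magic) sword archery magic
    else pvLoopA rest total sword archery magic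

def calc_pairs (notes : String) : Int :=
  pvLoopA notes.toList 0 0 0 0

-- ===== PORT B =====
-- B's helper count_ordered: one scan carrying (seen, sub).
def pvCountOrdered : List Char → Char → Char → Int → Int → Int
  | [], _, _, _, sub => sub
  | ch :: rest, upper, lower, seen, sub =>
    if ch = upper then pvCountOrdered rest upper lower (seen + 1) sub
    else if ch = lower then pvCountOrdered rest upper lower seen (sub + seen)
    else pvCountOrdered rest upper lower seen sub

def calc_pairs_alt (notes : String) : Int :=
  pvCountOrdered notes.toList 'A' 'a' 0 0
    + pvCountOrdered notes.toList 'B' 'b' 0 0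
    + pvCountOrdered notes.toList 'C' 'c' 0 0

-- ===== PRECONDITION & SPEC =====
def Spec_calc_pairs (notes : String) (out : Int) : Prop := out = calc_pairs_alt notes
instance (notes : String) (out : Int) : Decidable (Spec_calc_pairs notes out) := by unfold Spec_calc_pairs; infer_instance

-- ===== CLAIM (what is proved, stated in full; the proofs are below) =====
def Claim_equal_calc_pairs : Prop := ∀ (notes : String), Dom_calc_pairs notes → Spec_calc_pairs notes (calc_pairs notes)

-- ===== LEMMAS AND PROOFS =====

-- the subtotal accumulator of count_ordered shifts out
theorem pvCountOrdered_shift (cs : List Char) (u l : Char) (k s : Int) :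
    pvCountOrdered cs u l k s = s + pvCountOrdered cs u l k 0 := by
  induction cs generalizing k s with
  | nil => simp [pvCountOrdered]
  | cons c rest ih =>
    simp only [pvCountOrdered]
    split_ifs with h1 h2
    · exact ih _ _
    · rw [ih k (s + k), ih k (0 + k)]; ring
    · exact ih _ _

-- A's interleaved loop equals the sum of B's three independent scans
theorem pvLoopA_eq (cs : List Char) (t s ar m : Int) :
    pvLoopA cs t s ar m =
      t + pvCountOrdered cs 'A' 'a' s 0 + pvCountOrdered cs 'B' 'b' ar 0
        + pvCountOrdered cs 'C' 'c' m 0 := by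
  induction cs generalizing t s ar m with
  | nil => simp [pvLoopA, pvCountOrdered]
  | cons c rest ih =>
    by_cases h1 : c = 'A'
    · subst h1; simp [pvLoopA, pvCountOrdered]; rw [ih]
    · by_cases h2 : c = 'B'
      · subst h2; simp [pvLoopA, pvCountOrdered]; rw [ih]
      · by_cases h3 : c = 'C'
        · subst h3; simp [pvLoopA, pvCountOrdered]; rw [ih]
        · by_cases h4 : c = 'a'
          · subst h4; simp [pvLoopA, pvCountOrdered]
            rw [ih, pvCountOrdered_shift rest 'A' 'a' s s]; ring
          · by_cases h5 : c = 'b'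
            · subst h5; simp [pvLoopA, pvCountOrdered]
              rw [ih, pvCountOrdered_shift rest 'B' 'b' ar ar]; ring
            · by_cases h6 : c = 'c'
              · subst h6; simp [pvLoopA, pvCountOrdered]
                rw [ih, pvCountOrdered_shift rest 'C' 'c' m m]; ring
              · simp only [pvLoopA, pvCountOrdered, if_neg h1, if_neg h2,
                  if_neg h3, if_neg h4, if_neg h5, if_neg h6]
                rw [ih]

-- ===== VERDICT (by name: the statement is the Claim_ definition above) =====
theorem calc_pairs_spec : Claim_equal_calc_pairs := by
  intro notes _
  unfold Spec_calc_pairs calc_pairs calc_pairs_alt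
  rw [pvLoopA_eq]
  ring
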